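-- pv_equiv track=rewrite | github.com/yukienomiya/fondamenti_nomiya.1744602 | Exercises/Ex31/program.py | getSelectedLetters
-- ===== SOURCE A (Python) =====
-- def getSelectedLetters(wordList):
--   selectedLetters = set()
--   letters = set()
--   for word in wordList:
--     for letter in word:
--       if (letter.islower()):
--         letters.add(letter)
--   for letter in letters:
--     count = 0
--     for word in wordList:
--       if (letter in word):
--         count += 1
--     if (count % 2 == 1):
--       selectedLetters.add(letter)
--   return selectedLetters
-- ===== SOURCE B (Python) =====
-- def getSelectedLetters(wordList):
--   counts = {}
--   for word in wordList:
--     for letter in dict.fromkeys(word):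
--       if letter.islower():
--         counts[letter] = counts.get(letter, 0) + 1
--   return {letter for letter, c in counts.items() if c % 2 == 1}
-- ===== Notes on version B (the rewrite author's own statement) =====
-- stated objective: alternative
-- what changed: Replaces A's per-letter rescan of the whole word list (letters collected first, then one membership pass over all words per letter) by a single pass that counts, per word, its distinct lowercase letters into a dict and keeps the odd-count keys.
import Mathlib
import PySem

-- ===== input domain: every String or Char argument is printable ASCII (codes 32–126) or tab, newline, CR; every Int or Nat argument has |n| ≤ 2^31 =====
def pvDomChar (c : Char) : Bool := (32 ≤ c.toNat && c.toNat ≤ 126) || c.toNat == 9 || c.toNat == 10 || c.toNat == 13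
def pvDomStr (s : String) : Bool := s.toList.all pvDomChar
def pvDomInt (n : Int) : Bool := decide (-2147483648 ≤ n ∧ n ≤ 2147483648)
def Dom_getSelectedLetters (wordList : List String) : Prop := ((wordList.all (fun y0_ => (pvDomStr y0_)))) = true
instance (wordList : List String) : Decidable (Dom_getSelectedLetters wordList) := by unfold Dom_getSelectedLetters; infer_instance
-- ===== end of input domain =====

-- B replaces A's per-letter rescan of the whole word list by a single pass that counts each
-- word's distinct lowercase letters into a dict and keeps the odd-count keys (alternative
-- algorithm; Python A and B both return a set, so outputs are compared as finite sets).


-- ===== PORT A =====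
-- Python sets are PySem.Set (distinct elements, first-insertion order); iterating the
-- intermediate set `letters` only builds another set, so the result is order-independent.
def getSelectedLetters (wordList : List String) : List String :=
  let letters : PySem.Set Char :=
    wordList.foldl (fun ls word =>
      word.toList.foldl (fun ls letter =>
        if PySem.Chars.islower letter then PySem.Set.add ls letter else ls) ls)
      PySem.Set.empty
  letters.foldl (fun sel letter =>
    let count : Int := wordList.foldl (fun cnt word =>
      if PySem.Chars.isIn [letter] word.toList then cnt + 1 else cnt) 0
    if PySem.Int.mod count 2 = 1 then PySem.Set.add sel (String.ofList [letter]) else sel)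
    PySem.Set.empty

-- ===== PORT B =====
def getSelectedLetters_alt (wordList : List String) : List String :=
  let counts : PySem.Dict Char Int :=
    wordList.foldl (fun d word =>
      (PySem.List.dedup word.toList).foldl (fun d letter =>
        if PySem.Chars.islower letter then d.modify letter 0 (· + 1) else d) d)
      PySem.Dict.empty
  PySem.Set.ofList
    ((counts.items.filter (fun p => decide (PySem.Int.mod p.2 2 = 1))).map
      (fun p => String.ofList [p.1]))

-- ===== PRECONDITION & SPEC =====
def Spec_getSelectedLetters (wordList : List String) (out : List String) : Prop := out = getSelectedLetters_alt wordList
instance (wordList : List String) (out : List String) : Decidable (Spec_getSelectedLetters wordList out) := by unfold Spec_getSelectedLetters; infer_instance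

-- ===== CLAIM (what is proved, stated in full; the proofs are below) =====
def Claim_equal_getSelectedLetters : Prop := ∀ (wordList : List String), Dom_getSelectedLetters wordList → Spec_getSelectedLetters wordList (getSelectedLetters wordList)

-- ===== LEMMAS AND PROOFS =====

-- the list of distinct lowercase letters in first-appearance order, shared shape of both ports
def pvLetters (ws : List String) : PySem.Set Char :=
  ws.foldl (fun s w => PySem.Set.update s (w.toList.filter PySem.Chars.islower)) []

-- [c] in l  ↔  c ∈ l
lemma pvIsIn_singleton (c : Char) (l : List Char) :
    PySem.Chars.isIn [c] l = decide (c ∈ l) := by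
  rw [Bool.eq_iff_iff, PySem.Chars.isIn_iff_infix, decide_eq_true_iff]
  constructor
  · intro h; exact h.subset (by simp)
  · intro h; obtain ⟨s, t, rfl⟩ := List.append_of_mem h; exact ⟨s, t, by simp⟩

lemma pvOfList_filter {α : Type} [BEq α] [LawfulBEq α] (p : α → Bool) (xs : List α) :
    (PySem.Set.ofList xs).filter p = PySem.Set.ofList (xs.filter p) := by
  induction xs with
  | nil => rfl
  | cons x xs ih =>
    have hcomm : PySem.Set.discard ((PySem.Set.ofList xs).filter p) x
        = (PySem.Set.discard (PySem.Set.ofList xs) x).filter p := by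
      simp only [PySem.Set.discard, List.filter_filter]
      exact List.filter_congr (fun a _ => Bool.and_comm _ _)
    by_cases hp : p x = true
    · rw [PySem.Set.ofList_cons, List.filter_cons_of_pos hp, List.filter_cons_of_pos hp,
        PySem.Set.ofList_cons, ← hcomm, ih]
    · rw [PySem.Set.ofList_cons, List.filter_cons_of_neg hp, List.filter_cons_of_neg hp,
        ← hcomm, ih]
      simp only [PySem.Set.discard]
      apply List.filter_eq_self.mpr
      intro a ha
      have hmem : a ∈ xs.filter p := (PySem.Set.mem_ofList _ _).mp ha
      have hax : a ≠ x := by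
        rintro rfl; exact hp (List.mem_filter.mp hmem).2
      simp [hax]

lemma pvUpdate_ofList {α : Type} [BEq α] [LawfulBEq α] (s : PySem.Set α) (xs : List α) :
    PySem.Set.update s (PySem.Set.ofList xs) = PySem.Set.update s xs := by
  rw [PySem.Set.update_eq_append_filter, PySem.Set.update_eq_append_filter,
    PySem.Set.ofList_ofList]

lemma pvLetters_nodup_aux (ws : List String) : ∀ (s : PySem.Set Char), s.Nodup →
    (ws.foldl (fun s w => PySem.Set.update s (w.toList.filter PySem.Chars.islower)) s).Nodup := by
  induction ws with
  | nil => intro s hs; exact hs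
  | cons w ws ih => intro s hs; exact ih _ (PySem.Set.nodup_update _ _ hs)

lemma pvLetters_nodup (ws : List String) : (pvLetters ws).Nodup :=
  pvLetters_nodup_aux ws [] List.nodup_nil

lemma pvLetters_islower_aux (ws : List String) : ∀ (s : PySem.Set Char),
    (∀ c ∈ s, PySem.Chars.islower c = true) →
    ∀ c ∈ ws.foldl (fun s w => PySem.Set.update s (w.toList.filter PySem.Chars.islower)) s,
      PySem.Chars.islower c = true := by
  induction ws with
  | nil => intro s hs; exact hs
  | cons w ws ih =>
    intro s hs
    apply ih
    intro c hc
    rcases (PySem.Set.mem_update _ _ _).mp hc with h | h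
    · exact hs c h
    · exact (List.mem_filter.mp h).2

lemma pvLetters_islower (ws : List String) (c : Char) (hc : c ∈ pvLetters ws) :
    PySem.Chars.islower c = true :=
  pvLetters_islower_aux ws [] (by simp) c hc

lemma pvLettersA (ws : List String) :
    ws.foldl (fun ls word =>
      word.toList.foldl (fun ls letter =>
        if PySem.Chars.islower letter then PySem.Set.add ls letter else ls) ls)
      PySem.Set.empty = pvLetters ws := by
  unfold pvLetters
  have hfun : (fun (ls : PySem.Set Char) (word : String) =>
      word.toList.foldl (fun ls letter =>
        if PySem.Chars.islower letter then PySem.Set.add ls letter else ls) ls)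
      = fun s w => PySem.Set.update s (w.toList.filter PySem.Chars.islower) := by
    funext ls w
    rw [PySem.List.foldl_if_eq_foldl_filter]
    rfl
  rw [hfun]
  rfl

lemma pvStepB_keys (w : String) (d : PySem.Dict Char Int) :
    ((PySem.List.dedup w.toList).foldl (fun d letter =>
      if PySem.Chars.islower letter then d.modify letter 0 (· + 1) else d) d).keys
    = PySem.Set.update d.keys (w.toList.filter PySem.Chars.islower) := by
  show ((PySem.Set.ofList w.toList).foldl (fun d letter =>
      if PySem.Chars.islower letter then d.modify letter 0 (· + 1) else d) d).keys = _
  rw [PySem.List.foldl_if_eq_foldl_filter]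
  rw [PySem.Dict.keys_foldl_modify _ 0 (fun _ _ => (· + 1)) d]
  rw [pvOfList_filter, pvUpdate_ofList]

lemma pvKeysB (ws : List String) : ∀ (d : PySem.Dict Char Int),
    (ws.foldl (fun d word =>
      (PySem.List.dedup word.toList).foldl (fun d letter =>
        if PySem.Chars.islower letter then d.modify letter 0 (· + 1) else d) d) d).keys
    = ws.foldl (fun s w => PySem.Set.update s (w.toList.filter PySem.Chars.islower)) d.keys := by
  induction ws with
  | nil => intro d; rfl
  | cons w ws ih =>
    intro d
    rw [List.foldl_cons, List.foldl_cons, ih, pvStepB_keys]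

lemma pvStepB_getD (w : String) (d : PySem.Dict Char Int) (c : Char)
    (hc : PySem.Chars.islower c = true) :
    ((PySem.List.dedup w.toList).foldl (fun d letter =>
      if PySem.Chars.islower letter then d.modify letter 0 (· + 1) else d) d).getD c 0
    = d.getD c 0 + (if c ∈ w.toList then 1 else 0) := by
  show ((PySem.Set.ofList w.toList).foldl (fun d letter =>
      if PySem.Chars.islower letter then d.modify letter 0 (· + 1) else d) d).getD c 0 = _
  rw [PySem.List.foldl_if_eq_foldl_filter, PySem.Dict.getD_foldl_modify_add_one]
  congr 1
  rw [List.count_filter hc]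
  by_cases hm : c ∈ w.toList
  · rw [List.count_eq_one_of_mem (PySem.Set.nodup_ofList _)
      ((PySem.Set.mem_ofList _ _).mpr hm)]
    simp [hm]
  · rw [List.count_eq_zero_of_not_mem (fun h => hm ((PySem.Set.mem_ofList _ _).mp h))]
    simp [hm]

lemma pvCountB (ws : List String) (c : Char) (hc : PySem.Chars.islower c = true) :
    ∀ (d : PySem.Dict Char Int),
    (ws.foldl (fun d word =>
      (PySem.List.dedup word.toList).foldl (fun d letter =>
        if PySem.Chars.islower letter then d.modify letter 0 (· + 1) else d) d) d).getD c 0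
    = d.getD c 0 + (ws.countP (fun w => decide (c ∈ w.toList)) : Int) := by
  induction ws with
  | nil => intro d; simp
  | cons w ws ih =>
    intro d
    rw [List.foldl_cons, ih, pvStepB_getD w d c hc, List.countP_cons]
    by_cases hm : c ∈ w.toList
    · simp [hm]
      ring
    · simp [hm]

lemma pvCountA (ws : List String) (c : Char) :
    ws.foldl (fun cnt word =>
      if PySem.Chars.isIn [c] word.toList then cnt + 1 else cnt) 0
    = (ws.countP (fun w => decide (c ∈ w.toList)) : Int) := by
  rw [PySem.List.foldl_if_add_one]
  have h : ∀ w ∈ ws, ((fun w : String => PySem.Chars.isIn [c] w.toList) w = true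
      ↔ (fun w : String => decide (c ∈ w.toList)) w = true) := by
    intro w _
    show PySem.Chars.isIn [c] w.toList = true ↔ decide (c ∈ w.toList) = true
    rw [pvIsIn_singleton]
  rw [List.countP_congr h]
  simp

lemma pvStr_inj : Function.Injective (fun c : Char => String.ofList [c]) := by
  intro a b h
  simpa using congrArg String.toList h

lemma pvFoldAdd (q : Char → Prop) [DecidablePred q] :
    ∀ (l : List Char) (s : List String), l.Nodup → (∀ c ∈ l, String.ofList [c] ∉ s) →
    l.foldl (fun sel c => if q c then PySem.Set.add sel (String.ofList [c]) else sel) s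
    = s ++ (l.filter (fun c => decide (q c))).map (fun c => String.ofList [c]) := by
  intro l
  induction l with
  | nil => intro s _ _; simp
  | cons x l ih =>
    intro s hnd hnot
    rcases List.nodup_cons.mp hnd with ⟨hx, hnd'⟩
    rw [List.foldl_cons]
    by_cases hq : q x
    · rw [if_pos hq, PySem.Set.add_of_not_mem (hnot x (by simp))]
      rw [ih _ hnd' ?h]
      · rw [List.filter_cons_of_pos (by simpa using hq)]
        simp
      case h =>
        intro c hc hmem
        rcases List.mem_append.mp hmem with h1 | h2
        · exact hnot c (by simp [hc]) h1
        · have hcx : c = x := pvStr_inj (by simpa using h2)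
          exact hx (hcx ▸ hc)
    · rw [if_neg hq, ih _ hnd' (fun c hc => hnot c (by simp [hc]))]
      rw [List.filter_cons_of_neg (by simpa using hq)]

-- ===== VERDICT (by name: the statement is the Claim_ definition above) =====
theorem getSelectedLetters_spec : Claim_equal_getSelectedLetters := by
  intro wordList _
  show getSelectedLetters wordList = getSelectedLetters_alt wordList
  unfold getSelectedLetters getSelectedLetters_alt
  simp only []
  rw [pvLettersA]
  have hempty : (PySem.Set.empty : PySem.Set String) = [] := rfl
  rw [hempty]
  rw [pvFoldAdd (fun c => PySem.Int.mod (wordList.foldl (fun cnt word =>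
      if PySem.Chars.isIn [c] word.toList then cnt + 1 else cnt) 0) 2 = 1)
    (pvLetters wordList) [] (pvLetters_nodup wordList) (by simp), List.nil_append]
  have hkeys : (wordList.foldl (fun d word =>
      (PySem.List.dedup word.toList).foldl (fun d letter =>
        if PySem.Chars.islower letter then d.modify letter 0 (· + 1) else d) d)
      (PySem.Dict.empty : PySem.Dict Char Int)).keys = pvLetters wordList := pvKeysB wordList PySem.Dict.empty
  have hnd : (wordList.foldl (fun d word =>
      (PySem.List.dedup word.toList).foldl (fun d letter =>
        if PySem.Chars.islower letter then d.modify letter 0 (· + 1) else d) d)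
      (PySem.Dict.empty : PySem.Dict Char Int)).keys.Nodup := by
    rw [hkeys]; exact pvLetters_nodup wordList
  rw [PySem.Dict.items_eq_map_keys _ hnd 0, hkeys]
  rw [List.filter_map, List.map_map]
  simp only [Function.comp_def]
  rw [PySem.Set.ofList_eq_self_of_nodup _
    (((pvLetters_nodup wordList).filter _).map pvStr_inj)]
  apply congrArg
  apply List.filter_congr
  intro c hc
  have hlow := pvLetters_islower wordList c hc
  rw [pvCountA wordList c, pvCountB wordList c hlow PySem.Dict.empty]
  have hz : (PySem.Dict.empty : PySem.Dict Char Int).getD c 0 = 0 := rfl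
  rw [hz, zero_add]
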